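-- pv_equiv track=rewrite | github.com/Akkisdiary/dsa-solutions | min-heap.py | minHeap
-- ===== SOURCE A (Python) =====
-- from typing import List
--
-- class MinHeap:
--     def __init__(self):
--         self.length = 0
--         self.heap = [None]
--
--     def insert(self, element):
--         self.heap[self.length] = element
--         self.heap.append(None)
--         self.length += 1
--
--         i = self.length - 1
--         while i > 0:
--             parent = (i - 1) // 2
--             if self.heap[i] < self.heap[parent]:
--                 self.heap[i], self.heap[parent] = self.heap[parent], self.heap[i]
--             i = parent
--
--     def pop(self):
--         ans = None
--
--         if self.length > 0:
--             ans = self.heap[0]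
--             self.length -= 1
--             self.heap[0], self.heap[self.length] = self.heap[self.length], None
--             self.heap.pop(-1)
--
--             i = 0
--             while i <= self.length:
--                 child = -1
--                 left = (2 * i) + 1
--                 right = (2 * i) + 2
--
--                 if left < self.length:
--                     child = left
--
--                 if right < self.length and self.heap[right] < self.heap[left]:
--                     child = right
--
--                 if child >= 0 and self.heap[i] > self.heap[child]:
--                     self.heap[i], self.heap[child] = self.heap[child], self.heap[i]
--                     i = child
--                 else:
--                     break
--         return ans
--
-- def minHeap(N: int, Q: List[List[int]]) -> List[int]:
--     ans = []
--     heap = MinHeap()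
--     for op in Q:
--         if len(op) > 1:
--             heap.insert(op[1])
--         else:
--             ans.append(heap.pop())
--     return ans
-- ===== SOURCE B (Python) =====
-- from typing import List
--
-- def minHeap(N: int, Q: List[List[int]]) -> List[int]:
--     # Sorted list maintained by in-place insertion instead of a binary heap.
--     ans = []
--     data = []  # always sorted ascending
--     for op in Q:
--         if len(op) > 1:
--             x = op[1]
--             i = 0
--             while i < len(data) and data[i] <= x:
--                 i += 1
--             data.insert(i, x)
--         else:
--             ans.append(data.pop(0) if data else None)
--     return ans
-- ===== Notes on version B (the rewrite author's own statement) =====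
-- stated objective: simpler
-- what changed: Replaces the hand-written binary min-heap (array with sift-up/sift-down) by a plain sorted list: inserts go to their sorted position, a pop removes the head; same outputs since a pop always yields the minimum.
-- outside the precondition, e.g. on minHeap(1, [[0]]): A returns [None], B returns [None]
import Mathlib
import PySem

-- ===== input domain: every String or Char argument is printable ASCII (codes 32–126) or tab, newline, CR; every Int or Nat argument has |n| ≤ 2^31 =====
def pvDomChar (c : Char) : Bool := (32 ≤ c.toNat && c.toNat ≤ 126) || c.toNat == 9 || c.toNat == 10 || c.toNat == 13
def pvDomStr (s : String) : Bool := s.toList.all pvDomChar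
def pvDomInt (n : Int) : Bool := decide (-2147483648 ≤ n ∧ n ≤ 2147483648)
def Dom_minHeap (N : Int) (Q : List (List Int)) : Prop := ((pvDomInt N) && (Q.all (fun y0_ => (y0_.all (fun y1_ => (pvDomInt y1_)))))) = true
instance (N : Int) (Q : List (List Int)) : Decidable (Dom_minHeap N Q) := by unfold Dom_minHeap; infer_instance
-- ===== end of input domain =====

-- B replaces A's hand-written array binary heap (sift-up/sift-down) by a sorted list
-- (insert at sorted position, pop the head); same return value on Pre_ (no pop of an empty heap).

-- ===== PORT A =====
-- Python compares heap slots with `<`/`>`; the slots compared always hold ints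
-- (the trailing None sentinel is never compared on any input), so:
def oLt (a b : Option Int) : Bool :=
  match a, b with
  | some x, some y => decide (x < y)
  | _, _ => false

-- MinHeap.insert's while-loop (i > 0; swap with parent if smaller; i := parent);
-- fuel = i bounds the iteration count (i strictly decreases), so the guard never fires
def siftUp (fuel : Nat) (h : List (Option Int)) (i : Nat) : List (Option Int) :=
  match fuel with
  | 0 => h
  | fuel + 1 =>
    if 0 < i then
      let parent := (i - 1) / 2
      let h' := if oLt (h.getD i none) (h.getD parent none) then
                  (h.set i (h.getD parent none)).set parent (h.getD i none)
                else h
      siftUp fuel h' parent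
    else h

-- MinHeap.insert
def insertA (L : Nat) (h : List (Option Int)) (x : Int) : Nat × List (Option Int) :=
  let h1 := h.set L (some x)
  let h2 := h1 ++ [none]
  let L' := L + 1
  (L', siftUp (L' - 1) h2 (L' - 1))

-- MinHeap.pop's while-loop (i ≤ L; pick smaller child; swap down or break);
-- fuel = L + 1 - i bounds the iteration count (i strictly increases), so the guard never fires
def siftDown (fuel : Nat) (h : List (Option Int)) (L : Nat) (i : Nat) : List (Option Int) :=
  match fuel with
  | 0 => h
  | fuel + 1 =>
    if i ≤ L then
      let left := 2 * i + 1
      let right := 2 * i + 2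
      let child0 : Int := -1
      let child1 := if left < L then (left : Int) else child0
      let child2 := if right < L ∧ oLt (h.getD right none) (h.getD left none) then (right : Int) else child1
      if 0 ≤ child2 ∧ oLt (h.getD child2.toNat none) (h.getD i none) then
        siftDown fuel ((h.set i (h.getD child2.toNat none)).set child2.toNat (h.getD i none)) L child2.toNat
      else h
    else h

-- MinHeap.pop; `heap.pop(-1)` removes the (always present) trailing element, so dropLast is exact
def popA (L : Nat) (h : List (Option Int)) : Option Int × Nat × List (Option Int) :=
  if 0 < L then
    let ans := h.getD 0 none
    let L' := L - 1
    let h1 := (h.set 0 (h.getD L' none)).set L' none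
    let h2 := h1.dropLast
    (ans, L', siftDown (L' + 1) h2 L' 0)
  else (none, L, h)

-- body of the for-loop over Q; state = (ans, heap.length, heap)
-- (`a.getD 0` : the popped value is None only for a pop of an empty heap, which Pre_ excludes)
def stepA (s : List Int × Nat × List (Option Int)) (op : List Int) : List Int × Nat × List (Option Int) :=
  if 1 < op.length then
    let r := insertA s.2.1 s.2.2 (op.getD 1 0)
    (s.1, r.1, r.2)
  else
    let r := popA s.2.1 s.2.2
    (s.1 ++ [r.1.getD 0], r.2.1, r.2.2)

def minHeap (N : Int) (Q : List (List Int)) : List Int :=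
  (Q.foldl stepA ([], 0, [none])).1

-- ===== PORT B =====
-- B's while-loop scanning for the sorted insertion point, then data.insert(i, x)
def insSorted (x : Int) : List Int → List Int
  | [] => [x]
  | y :: t => if y ≤ x then y :: insSorted x t else x :: y :: t

-- body of B's for-loop; state = (ans, data); a pop of empty data appends None in
-- Python, which Pre_ excludes (placeholder 0 here)
def stepB (s : List Int × List Int) (op : List Int) : List Int × List Int :=
  if 1 < op.length then (s.1, insSorted (op.getD 1 0) s.2)
  else
    match s.2 with
    | [] => (s.1 ++ [0], [])
    | d :: t => (s.1 ++ [d], t)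

def minHeap_alt (N : Int) (Q : List (List Int)) : List Int :=
  (Q.foldl stepB ([], [])).1

-- ===== PRECONDITION & SPEC =====
-- Pre_ excludes queries that pop an empty heap: there A appends None to the answer,
-- which is not a value of the declared List[int] result type (B does the same).
def Pre_minHeap (N : Int) (Q : List (List Int)) : Prop :=
  ∀ i, i < Q.length → (Q.getD i []).length ≤ 1 →
    ((Q.take i).countP (fun op => decide (1 < op.length))) >
      ((Q.take i).countP (fun op => decide (op.length ≤ 1)))

instance (N : Int) (Q : List (List Int)) : Decidable (Pre_minHeap N Q) := by
  unfold Pre_minHeap; infer_instance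

def pvWitness_minHeap : Int × List (List Int) := (1, [[0, 5], [0, 3], [0], [0]])

def Spec_minHeap (N : Int) (Q : List (List Int)) (out : List Int) : Prop := out = minHeap_alt N Q
instance (N : Int) (Q : List (List Int)) (out : List Int) : Decidable (Spec_minHeap N Q out) := by unfold Spec_minHeap; infer_instance

-- ===== CLAIM (what is proved, stated in full; the proofs are below) =====
def Claim_equal_minHeap : Prop := ∀ (N : Int) (Q : List (List Int)), Dom_minHeap N Q → Pre_minHeap N Q → Spec_minHeap N Q (minHeap N Q)

-- ===== LEMMAS AND PROOFS =====

-- the heap list is always (its int elements) ++ [None]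
def E (es : List Int) : List (Option Int) := es.map some ++ [none]

def g (es : List Int) (j : Nat) : Int := es.getD j 0

-- array heap property
def IsHeap (es : List Int) : Prop := ∀ j, 0 < j → j < es.length → g es ((j - 1) / 2) ≤ g es j

-- heap except that the pair (parent i, i) may be violated; the grandparent bounds i's children
def HXU (es : List Int) (i : Nat) : Prop :=
  (∀ j, 0 < j → j < es.length → j ≠ i → g es ((j - 1) / 2) ≤ g es j) ∧
  (0 < i → ∀ j, j < es.length → ((j - 1) / 2 = i ∧ 0 < j) → g es ((i - 1) / 2) ≤ g es j)

-- heap except that i's children may exceed it; i's parent bounds i's children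
def HXD (es : List Int) (i : Nat) : Prop :=
  (∀ j, 0 < j → j < es.length → (j - 1) / 2 ≠ i → g es ((j - 1) / 2) ≤ g es j) ∧
  (0 < i → ∀ j, j < es.length → ((j - 1) / 2 = i ∧ 0 < j) → g es ((i - 1) / 2) ≤ g es j)

-- can the remaining ops run without popping an empty structure of current size n?
def Ok : List (List Int) → Nat → Prop
  | [], _ => True
  | op :: rest, n => if 1 < op.length then Ok rest (n + 1) else 0 < n ∧ Ok rest (n - 1)

lemma E_getD {es : List Int} {j : Nat} (h : j < es.length) :
    (E es).getD j none = some (es.getD j 0) := by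
  simp [E, List.getD, List.getElem?_append, h, List.getElem?_eq_getElem]

lemma E_set {es : List Int} {j : Nat} (h : j < es.length) (v : Int) :
    (E es).set j (some v) = E (es.set j v) := by
  unfold E
  rw [List.set_append_left _ _ (by simpa using h), List.map_set]

lemma g_set {es : List Int} {i : Nat} (hi : i < es.length) (v : Int) (j : Nat) :
    g (es.set i v) j = if j = i then v else g es j := by
  rcases eq_or_ne j i with rfl | hne
  · simp [g, List.getD, hi]
  · simp [g, List.getD, List.getElem?_set_ne (Ne.symm hne), hne]

def swapL (es : List Int) (i j : Nat) : List Int := (es.set i (g es j)).set j (g es i)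

lemma swapL_length (es : List Int) (i j : Nat) : (swapL es i j).length = es.length := by
  simp [swapL]

lemma g_swapL {es : List Int} {i j : Nat} (hi : i < es.length) (hj : j < es.length)
    (hne : i ≠ j) (k : Nat) :
    g (swapL es i j) k = if k = j then g es i else if k = i then g es j else g es k := by
  unfold swapL
  rw [g_set (by simpa using hj), g_set hi]

lemma getD_cons_perm (x : Int) : ∀ (t : List Int) (m : Nat), m < t.length →
    List.Perm (t.getD m 0 :: t.set m x) (x :: t) := by
  intro t
  induction t with
  | nil => intro m hm; simp at hm
  | cons y s ih =>
    intro m hm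
    cases m with
    | zero => simpa using List.Perm.swap x y s
    | succ m =>
      simp only [List.getD_cons_succ, List.set_cons_succ]
      exact (List.Perm.swap _ _ _).trans
        (((ih m (by simpa using hm)).cons y).trans (List.Perm.swap _ _ _))

lemma swapL_perm : ∀ (es : List Int) (i j : Nat), i < es.length → j < es.length →
    List.Perm (swapL es i j) es := by
  intro es
  induction es with
  | nil => intro i j hi; simp at hi
  | cons x t ih =>
    intro i j hi hj
    cases i with
    | zero =>
      cases j with
      | zero => simp [swapL, g]
      | succ m =>
        unfold swapL
        simp only [g, List.getD_cons_succ, List.getD_cons_zero, List.set_cons_zero,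
          List.set_cons_succ]
        exact getD_cons_perm x t m (by simpa using hj)
    | succ n =>
      cases j with
      | zero =>
        unfold swapL
        simp only [g, List.getD_cons_succ, List.getD_cons_zero, List.set_cons_succ,
          List.set_cons_zero]
        exact getD_cons_perm x t n (by simpa using hi)
      | succ m =>
        unfold swapL
        simp only [g, List.getD_cons_succ, List.set_cons_succ]
        exact (ih n m (by simpa using hi) (by simpa using hj)).cons x

lemma oLt_E {es : List Int} {i j : Nat} (hi : i < es.length) (hj : j < es.length) :
    oLt ((E es).getD i none) ((E es).getD j none) = decide (g es i < g es j) := by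
  rw [E_getD hi, E_getD hj]; rfl

lemma gsw_i {es : List Int} {i j : Nat} (hi : i < es.length) (hj : j < es.length)
    (hne : i ≠ j) : g (swapL es i j) i = g es j := by
  rw [g_swapL hi hj hne, if_neg hne, if_pos rfl]

lemma gsw_j {es : List Int} {i j : Nat} (hi : i < es.length) (hj : j < es.length)
    (hne : i ≠ j) : g (swapL es i j) j = g es i := by
  rw [g_swapL hi hj hne, if_pos rfl]

lemma gsw_o {es : List Int} {i j : Nat} (hi : i < es.length) (hj : j < es.length)
    (hne : i ≠ j) (k : Nat) (hki : k ≠ i) (hkj : k ≠ j) : g (swapL es i j) k = g es k := by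
  rw [g_swapL hi hj hne, if_neg hkj, if_neg hki]

-- sift-up invariant: a swap with the parent moves the violation up
lemma HXU_swap (es : List Int) (i : Nat) (h0 : 0 < i) (hi : i < es.length)
    (hx : HXU es i) (hlt : g es i < g es ((i - 1) / 2)) :
    HXU (swapL es i ((i - 1) / 2)) ((i - 1) / 2) := by
  have hplen : (i - 1) / 2 < es.length := by omega
  constructor
  · intro j hj0 hjlen hjne
    rw [swapL_length] at hjlen
    by_cases hji : j = i
    · subst hji
      rw [(by omega : (j - 1) / 2 = (j - 1) / 2)]
      rw [gsw_j hi hplen (by omega), gsw_i hi hplen (by omega)]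
      exact hlt.le
    · by_cases hpj : (j - 1) / 2 = (i - 1) / 2
      · rw [hpj, gsw_j hi hplen (by omega), gsw_o hi hplen (by omega) j hji hjne]
        have h1 := hx.1 j hj0 hjlen hji
        rw [hpj] at h1
        exact hlt.le.trans h1
      · by_cases hpji : (j - 1) / 2 = i
        · rw [hpji, gsw_i hi hplen (by omega), gsw_o hi hplen (by omega) j hji (by omega)]
          exact hx.2 h0 j hjlen ⟨hpji, hj0⟩
        · rw [gsw_o hi hplen (by omega) ((j - 1) / 2) hpji hpj,
            gsw_o hi hplen (by omega) j hji (by omega)]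
          exact hx.1 j hj0 hjlen hji
  · intro hp0 j hjlen hj
    rw [swapL_length] at hjlen
    rw [gsw_o hi hplen (by omega) (((i - 1) / 2 - 1) / 2) (by omega) (by omega)]
    by_cases hji : j = i
    · subst hji
      rw [gsw_i hi hplen (by omega)]
      exact hx.1 _ hp0 hplen (by omega)
    · rw [gsw_o hi hplen (by omega) j hji (by omega)]
      have h1 := hx.1 _ hp0 hplen (by omega)
      have h2 := hx.1 j hj.2 hjlen hji
      rw [(by omega : (j - 1) / 2 = (i - 1) / 2)] at h2
      exact h1.trans h2

lemma HXU_noswap (es : List Int) (i : Nat) (h0 : 0 < i) (hi : i < es.length)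
    (hx : HXU es i) (hge : g es ((i - 1) / 2) ≤ g es i) : HXU es ((i - 1) / 2) := by
  have hplen : (i - 1) / 2 < es.length := by omega
  constructor
  · intro j hj0 hjlen hjne
    by_cases hji : j = i
    · subst hji; exact hge
    · exact hx.1 j hj0 hjlen hji
  · intro hp0 j hjlen hj
    have h1 := hx.1 _ hp0 hplen (by omega)
    by_cases hji : j = i
    · subst hji; exact h1.trans hge
    · have h2 := hx.1 j hj.2 hjlen hji
      rw [(by omega : (j - 1) / 2 = (i - 1) / 2)] at h2
      exact h1.trans h2

-- sift-down invariant: a swap with the smaller child moves the violation down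
lemma HXD_swap (es : List Int) (i c : Nat) (hi : i < es.length) (hic : i < c)
    (hc1 : (c - 1) / 2 = i) (hclen : c < es.length)
    (hmin : ∀ j, j < es.length → ((j - 1) / 2 = i ∧ 0 < j) → g es c ≤ g es j)
    (hswap : g es c < g es i) (hx : HXD es i) : HXD (swapL es i c) c := by
  constructor
  · intro j hj0 hjlen hjne
    rw [swapL_length] at hjlen
    by_cases hjc : j = c
    · subst hjc
      rw [hc1, gsw_i hi hclen (by omega), gsw_j hi hclen (by omega)]
      exact hswap.le
    · by_cases hji : j = i
      · subst hji
        rw [gsw_o hi hclen (by omega) ((j - 1) / 2) (by omega) (by omega),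
          gsw_i hi hclen (by omega)]
        exact hx.2 hj0 c hclen ⟨hc1, by omega⟩
      · by_cases hpji : (j - 1) / 2 = i
        · rw [hpji, gsw_i hi hclen (by omega), gsw_o hi hclen (by omega) j hji hjc]
          exact hmin j hjlen ⟨hpji, hj0⟩
        · rw [gsw_o hi hclen (by omega) ((j - 1) / 2) hpji hjne,
            gsw_o hi hclen (by omega) j hji hjc]
          exact hx.1 j hj0 hjlen hpji
  · intro hc0 j hjlen hj
    rw [swapL_length] at hjlen
    rw [hc1, gsw_i hi hclen (by omega)]
    rw [gsw_o hi hclen (by omega) j (by omega) (by omega)]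
    have h2 := hx.1 j hj.2 hjlen (by omega)
    rw [hj.1] at h2
    exact h2

lemma HXD_break (es : List Int) (i : Nat) (hx : HXD es i)
    (h : ∀ j, j < es.length → ((j - 1) / 2 = i ∧ 0 < j) → g es i ≤ g es j) : IsHeap es := by
  intro j hj0 hjlen
  by_cases hpj : (j - 1) / 2 = i
  · rw [hpj]; exact h j hjlen ⟨hpj, hj0⟩
  · exact hx.1 j hj0 hjlen hpj

-- sift-up correctness
lemma siftUp_spec : ∀ (fuel i : Nat) (es : List Int), i ≤ fuel → i < es.length → HXU es i →
    ∃ es', siftUp fuel (E es) i = E es' ∧ List.Perm es' es ∧ IsHeap es' := by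
  intro fuel
  induction fuel with
  | zero =>
    intro i es hf hi hx
    have hi0 : i = 0 := by omega
    subst hi0
    rw [siftUp]
    exact ⟨es, rfl, List.Perm.refl es, fun j hj0 hjlen => hx.1 j hj0 hjlen (by omega)⟩
  | succ fuel ih =>
    intro i es hf hi hx
    rw [siftUp]
    by_cases h0 : 0 < i
    · have hp : (i - 1) / 2 < i := by omega
      have hplen : (i - 1) / 2 < es.length := lt_trans hp hi
      simp only [if_pos h0]
      rw [oLt_E hi hplen]
      by_cases hlt : g es i < g es ((i - 1) / 2)
      · rw [if_pos (decide_eq_true hlt)]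
        rw [E_getD hplen, E_getD hi, E_set hi, E_set (by simpa using hplen)]
        have hsw : (es.set i (es.getD ((i - 1) / 2) 0)).set ((i - 1) / 2) (es.getD i 0)
            = swapL es i ((i - 1) / 2) := rfl
        rw [hsw]
        obtain ⟨es', h1, h2, h3⟩ := ih _ _ (by omega) (by rw [swapL_length]; exact hplen)
          (HXU_swap es i h0 hi hx hlt)
        exact ⟨es', h1, h2.trans (swapL_perm es i _ hi hplen), h3⟩
      · rw [if_neg (by simpa using hlt)]
        exact ih _ _ (by omega) hplen (HXU_noswap es i h0 hi hx (not_lt.mp hlt))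
    · simp only [if_neg h0]
      exact ⟨es, rfl, List.Perm.refl es, fun j hj0 hjlen => hx.1 j hj0 hjlen (by omega)⟩

-- sift-down correctness
lemma siftDown_spec : ∀ (fuel i : Nat) (es : List Int), es.length + 1 - i ≤ fuel → i ≤ es.length →
    HXD es i →
    ∃ es', siftDown fuel (E es) es.length i = E es' ∧ List.Perm es' es ∧ IsHeap es' := by
  intro fuel
  induction fuel with
  | zero =>
    intro i es hf hi hx
    exact absurd hf (by omega)
  | succ fuel ih =>
    intro i es hf hi hx
    rw [siftDown]
    simp only [if_pos hi]
    by_cases hR : 2 * i + 2 < es.length ∧ oLt ((E es).getD (2*i+2) none) ((E es).getD (2*i+1) none) = true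
    · rw [if_pos hR]
      have hRlen : 2 * i + 2 < es.length := hR.1
      have hiL : i < es.length := by omega
      have hRlt : g es (2*i+2) < g es (2*i+1) := by
        have hb := hR.2; rw [oLt_E hRlen (by omega)] at hb; exact of_decide_eq_true hb
      have htn : ((2*i+2 : Nat) : Int).toNat = 2*i+2 := by omega
      rw [htn]
      by_cases hswap : g es (2*i+2) < g es i
      · rw [if_pos ⟨Int.natCast_nonneg _, by rw [oLt_E hRlen hiL]; exact decide_eq_true hswap⟩]
        rw [E_getD hRlen, E_getD hiL, E_set hiL, E_set (by simpa using hRlen)]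
        have hsw : (es.set i (es.getD (2*i+2) 0)).set (2*i+2) (es.getD i 0)
            = swapL es i (2*i+2) := rfl
        rw [hsw]
        have hmin : ∀ j, j < es.length → ((j - 1) / 2 = i ∧ 0 < j) → g es (2*i+2) ≤ g es j := by
          intro j hjlen hj
          rcases (by omega : j = 2*i+1 ∨ j = 2*i+2) with rfl | rfl
          · exact hRlt.le
          · exact le_refl _
        obtain ⟨es', h1, h2, h3⟩ := ih (2*i+2) (swapL es i (2*i+2))
          (by rw [swapL_length]; omega) (by rw [swapL_length]; omega)
          (HXD_swap es i (2*i+2) hiL (by omega) (by omega) hRlen hmin hswap hx)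
        rw [swapL_length] at h1
        exact ⟨es', h1, h2.trans (swapL_perm es i _ hiL hRlen), h3⟩
      · rw [if_neg (by
          rintro ⟨-, hb⟩
          rw [oLt_E hRlen hiL] at hb
          exact hswap (of_decide_eq_true hb))]
        refine ⟨es, rfl, List.Perm.refl es, HXD_break es i hx ?_⟩
        intro j hjlen hj
        have hge : g es i ≤ g es (2*i+2) := not_lt.mp hswap
        rcases (by omega : j = 2*i+1 ∨ j = 2*i+2) with rfl | rfl
        · exact hge.trans hRlt.le
        · exact hge
    · rw [if_neg hR]
      by_cases hL : 2 * i + 1 < es.length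
      · rw [if_pos hL]
        have hiL : i < es.length := by omega
        have htn : ((2*i+1 : Nat) : Int).toNat = 2*i+1 := by omega
        rw [htn]
        have hLR : 2*i+2 < es.length → g es (2*i+1) ≤ g es (2*i+2) := by
          intro h
          by_contra hcon
          exact hR ⟨h, by rw [oLt_E h hL]; exact decide_eq_true (by omega)⟩
        by_cases hswap : g es (2*i+1) < g es i
        · rw [if_pos ⟨Int.natCast_nonneg _, by rw [oLt_E hL hiL]; exact decide_eq_true hswap⟩]
          rw [E_getD hL, E_getD hiL, E_set hiL, E_set (by simpa using hL)]
          have hsw : (es.set i (es.getD (2*i+1) 0)).set (2*i+1) (es.getD i 0)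
              = swapL es i (2*i+1) := rfl
          rw [hsw]
          have hmin : ∀ j, j < es.length → ((j - 1) / 2 = i ∧ 0 < j) → g es (2*i+1) ≤ g es j := by
            intro j hjlen hj
            rcases (by omega : j = 2*i+1 ∨ j = 2*i+2) with rfl | rfl
            · exact le_refl _
            · exact hLR hjlen
          obtain ⟨es', h1, h2, h3⟩ := ih (2*i+1) (swapL es i (2*i+1))
            (by rw [swapL_length]; omega) (by rw [swapL_length]; omega)
            (HXD_swap es i (2*i+1) hiL (by omega) (by omega) hL hmin hswap hx)
          rw [swapL_length] at h1
          exact ⟨es', h1, h2.trans (swapL_perm es i _ hiL hL), h3⟩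
        · rw [if_neg (by
            rintro ⟨-, hb⟩
            rw [oLt_E hL hiL] at hb
            exact hswap (of_decide_eq_true hb))]
          refine ⟨es, rfl, List.Perm.refl es, HXD_break es i hx ?_⟩
          intro j hjlen hj
          have hge : g es i ≤ g es (2*i+1) := not_lt.mp hswap
          rcases (by omega : j = 2*i+1 ∨ j = 2*i+2) with rfl | rfl
          · exact hge
          · exact hge.trans (hLR hjlen)
      · rw [if_neg hL]
        rw [if_neg (by rintro ⟨hb, -⟩; omega :
          ¬ ((0:Int) ≤ -1 ∧ oLt ((E es).getD (Int.toNat (-1)) none) ((E es).getD i none) = true))]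
        refine ⟨es, rfl, List.Perm.refl es, HXD_break es i hx ?_⟩
        intro j hjlen hj
        exact absurd hj.1 (by omega)

-- insert correctness
lemma insertA_spec (es : List Int) (x : Int) (hh : IsHeap es) :
    ∃ es', insertA es.length (E es) x = (es'.length, E es') ∧ List.Perm es' (x :: es) ∧ IsHeap es' := by
  unfold insertA
  have hset : (E es).set es.length (some x) = (es ++ [x]).map some := by
    simp [E, List.set_append, List.map_append]
  have hE : (E es).set es.length (some x) ++ [none] = E (es ++ [x]) := by
    rw [hset]; rfl
  simp only [hE]
  have hx : HXU (es ++ [x]) es.length := by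
    constructor
    · intro j hj0 hjlen hjne
      simp only [List.length_append, List.length_cons, List.length_nil] at hjlen
      have hj : j < es.length := by omega
      have hpj : (j - 1) / 2 < es.length := by omega
      have e1 : g (es ++ [x]) j = g es j := by
        simp [g, List.getD, List.getElem?_append, hj, List.getElem?_eq_getElem]
      have e2 : g (es ++ [x]) ((j-1)/2) = g es ((j-1)/2) := by
        simp [g, List.getD, List.getElem?_append, hpj, List.getElem?_eq_getElem]
      rw [e1, e2]; exact hh j hj0 hj
    · intro h0 j hjlen hj
      simp only [List.length_append, List.length_cons, List.length_nil] at hjlen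
      omega
  obtain ⟨es', h1, h2, h3⟩ := siftUp_spec es.length es.length (es ++ [x]) (le_refl _) (by simp) hx
  refine ⟨es', ?_, h2.trans (List.perm_append_singleton x es), h3⟩
  have hlen : es'.length = es.length + 1 := by
    rw [h2.length_eq]; simp
  simp only [Nat.add_sub_cancel, h1, hlen]

-- removing the trailing sentinel after overwriting the last slot
lemma E_pop_step (t : List Int) (ht : t ≠ []) :
    ((E t).set (t.length - 1) none).dropLast = E (t.take (t.length - 1)) := by
  obtain ⟨u, v, huv, hul⟩ : ∃ u v, t = u ++ [v] ∧ u.length = t.length - 1 :=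
    ⟨t.dropLast, t.getLast ht, (List.dropLast_concat_getLast ht).symm, by simp⟩
  rw [huv]
  rw [(by simp : (u ++ [v]).length - 1 = u.length)]
  rw [(by simp : (u ++ [v]).take u.length = u)]
  rw [(by simp [E] : E (u ++ [v]) = u.map some ++ [some v, none])]
  rw [List.set_append_right _ _ (by simp)]
  simp only [List.length_map, Nat.sub_self]
  rw [(by rfl : ([some v, none] : List (Option Int)).set 0 none = [none, none])]
  rw [(by simp : u.map some ++ ([none, none] : List (Option Int))
      = (u.map some ++ [none]) ++ [none])]
  rw [List.dropLast_concat]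
  rfl

lemma popA_eq (L : Nat) (h : List (Option Int)) (hL : 0 < L) :
    popA L h = (h.getD 0 none, L - 1,
      siftDown (L - 1 + 1) (((h.set 0 (h.getD (L - 1) none)).set (L - 1) none).dropLast) (L - 1) 0) := by
  rw [popA, if_pos hL]

-- pop correctness
lemma popA_spec (es : List Int) (hne : es ≠ []) (hh : IsHeap es) :
    ∃ es', popA es.length (E es) = (some (g es 0), es.length - 1, E es') ∧
      List.Perm es' es.tail ∧ IsHeap es' := by
  obtain ⟨e0, rest, rfl⟩ : ∃ e0 rest, es = e0 :: rest := by
    cases es with | nil => exact absurd rfl hne | cons a t => exact ⟨a, t, rfl⟩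
  set es := e0 :: rest with hes
  have hlen : es.length = rest.length + 1 := by simp [hes]
  have hpos : 0 < es.length := by omega
  rw [popA_eq _ _ hpos]
  have hL' : es.length - 1 = rest.length := by omega
  have hlt : es.length - 1 < es.length := by omega
  have h0lt : 0 < es.length := hpos
  rw [E_getD (by omega : 0 < es.length), E_getD hlt]
  set lastEl := es.getD (es.length - 1) 0 with hlast
  rw [E_set (by omega : 0 < es.length)]
  have hlen2 : (es.set 0 lastEl).length = es.length := by simp
  have hstep : ((E (es.set 0 lastEl)).set (es.length - 1) none).dropLast
      = E ((es.set 0 lastEl).take (es.length - 1)) := by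
    rw [(by rw [hlen2] : es.length - 1 = (es.set 0 lastEl).length - 1)]
    exact E_pop_step _ (by intro hc; rw [hc] at hlen2; simp at hlen2; omega)
  rw [hstep]
  set es1 := (es.set 0 lastEl).take (es.length - 1) with hes1
  have hes1len : es1.length = es.length - 1 := by simp [hes1]
  have hg1 : ∀ j, j < es1.length → g es1 j = if j = 0 then lastEl else g es j := by
    intro j hj
    rw [hes1len] at hj
    have hj2 : j < (es.set 0 lastEl).length := by simp; omega
    have : g es1 j = g (es.set 0 lastEl) j := by
      simp [hes1, g, List.getD, (by omega : j < es.length - 1)]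
      rw [List.getElem?_eq_getElem hj2]
      rfl
    rw [this, g_set (by omega) lastEl j]
  have hxd : HXD es1 0 := by
    constructor
    · intro j hj0 hjlen hpj
      rw [hg1 j hjlen, hg1 _ (by omega)]
      rw [if_neg (by omega), if_neg (by omega)]
      exact hh j hj0 (by omega)
    · intro h; omega
  obtain ⟨es', h1, h2, h3⟩ := siftDown_spec (es1.length + 1) 0 es1 (by omega) (by omega) hxd
  rw [hes1len] at h1
  refine ⟨es', ?_, ?_, h3⟩
  · rw [h1]
    rfl
  · -- es1 ~ rest
    have htail : es.tail = rest := by simp [hes]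
    rw [htail]
    refine h2.trans ?_
    rcases Nat.eq_zero_or_pos rest.length with hr0 | hrpos
    · have : rest = [] := List.eq_nil_of_length_eq_zero hr0
      subst this
      have : es1 = [] := List.eq_nil_of_length_eq_zero (by omega)
      rw [this]
    · -- es1 = lastEl :: rest.dropLast, and lastEl is rest's last element
      have hes1eq : es1 = lastEl :: rest.take (rest.length - 1) := by
        rw [hes1, hes, List.set_cons_zero, hL']
        cases rest with
        | nil => exact absurd hrpos (by simp)
        | cons b s => simp [List.take_succ_cons]
      have hlast2 : lastEl = rest.getD (rest.length - 1) 0 := by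
        obtain ⟨n, hn⟩ : ∃ n, rest.length = n + 1 := ⟨rest.length - 1, by omega⟩
        rw [hlast]
        show (e0 :: rest).getD ((e0 :: rest).length - 1) 0 = _
        simp [hn, List.getD_cons_succ]
      have hdl : rest.take (rest.length - 1) = rest.dropLast := by
        rw [List.dropLast_eq_take]
      rw [hes1eq, hdl, hlast2]
      have hrne : rest ≠ [] := by intro h; rw [h] at hrpos; simp at hrpos
      have hsplit : rest.dropLast ++ [rest.getD (rest.length - 1) 0] = rest := by
        have h1 := List.dropLast_concat_getLast hrne
        have : rest.getD (rest.length - 1) 0 = rest.getLast hrne := by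
          rw [List.getLast_eq_getElem]
          simp [List.getD, List.getElem?_eq_getElem, (by omega : rest.length - 1 < rest.length)]
        rw [this, h1]
      refine ((List.perm_append_singleton _ _).symm).trans ?_
      rw [hsplit]

-- the heap root is a minimum
lemma root_le (es : List Int) (hh : IsHeap es) : ∀ j, j < es.length → g es 0 ≤ g es j := by
  intro j
  induction j using Nat.strong_induction_on with
  | _ j ih =>
    intro hj
    rcases Nat.eq_zero_or_pos j with rfl | hj0
    · exact le_refl _
    · exact le_trans (ih ((j-1)/2) (by omega) (by omega)) (hh j hj0 hj)

lemma root_min (es : List Int) (hh : IsHeap es) {x : Int} (hx : x ∈ es) : g es 0 ≤ x := by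
  obtain ⟨j, hj, rfl⟩ := List.getElem_of_mem hx
  have : g es j = es[j] := by simp [g, List.getD, List.getElem?_eq_getElem, hj]
  rw [← this]
  exact root_le es hh j hj

-- B's insertion: permutation and sortedness
lemma insSorted_perm (x : Int) : ∀ l : List Int, List.Perm (insSorted x l) (x :: l) := by
  intro l
  induction l with
  | nil => simp [insSorted]
  | cons y t ih =>
    rw [insSorted]
    by_cases h : y ≤ x
    · rw [if_pos h]
      exact (ih.cons y).trans (List.Perm.swap x y t)
    · rw [if_neg h]

lemma insSorted_sorted (x : Int) : ∀ l : List Int, l.Sorted (· ≤ ·) →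
    (insSorted x l).Sorted (· ≤ ·) := by
  intro l
  induction l with
  | nil => intro _; exact List.pairwise_singleton _ _
  | cons y t ih =>
    intro hs
    rw [List.sorted_cons] at hs
    rw [insSorted]
    by_cases h : y ≤ x
    · rw [if_pos h]
      rw [List.sorted_cons]
      refine ⟨?_, ih hs.2⟩
      intro b hb
      rcases List.mem_cons.mp (((insSorted_perm x t).mem_iff).mp hb) with rfl | hb'
      · exact h
      · exact hs.1 b hb'
    · rw [if_neg h]
      rw [List.sorted_cons]
      refine ⟨?_, List.sorted_cons.mpr hs⟩
      intro b hb
      rcases List.mem_cons.mp hb with rfl | hb'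
      · exact le_of_lt (lt_of_not_ge h)
      · exact le_of_lt (lt_of_lt_of_le (lt_of_not_ge h) (hs.1 b hb'))

-- heads agree: the heap root equals the sorted list's head
lemma root_eq_head (es : List Int) (d : Int) (t : List Int) (hh : IsHeap es)
    (hperm : List.Perm es (d :: t)) (hs : (d :: t).Sorted (· ≤ ·)) : g es 0 = d := by
  have hne : es ≠ [] := by
    intro h; rw [h] at hperm; exact absurd hperm.length_eq (by simp)
  have hmem0 : g es 0 ∈ es := by
    cases es with
    | nil => exact absurd rfl hne
    | cons a s => simp [g]
  have h1 : d ≤ g es 0 := by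
    rcases List.mem_cons.mp (hperm.mem_iff.mp hmem0) with h | h
    · omega
    · exact (List.sorted_cons.mp hs).1 _ h
  have h2 : g es 0 ≤ d := root_min es hh (hperm.mem_iff.mpr (List.mem_cons_self))
  omega

-- the Pre_ counting condition implies Ok
lemma ok_of_counts : ∀ (Q : List (List Int)) (n : Nat),
    (∀ i, i < Q.length → (Q.getD i []).length ≤ 1 →
      ((Q.take i).countP (fun op => decide (1 < op.length))) + n >
        ((Q.take i).countP (fun op => decide (op.length ≤ 1)))) → Ok Q n := by
  intro Q
  induction Q with
  | nil => intro n _; trivial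
  | cons op rest ih =>
    intro n h
    rw [Ok]
    by_cases hop : 1 < op.length
    · rw [if_pos hop]
      apply ih
      intro i hi hpop
      have := h (i + 1) (by simpa using hi) (by simpa using hpop)
      simp only [List.take_succ_cons, List.countP_cons] at this
      have hgt : ¬ op.length ≤ 1 := by omega
      simp [hop, hgt] at this ⊢
      omega
    · rw [if_neg hop]
      have h0 := h 0 (by simp) (by simpa using le_of_not_gt hop)
      simp at h0
      refine ⟨h0, ?_⟩
      apply ih
      intro i hi hpop
      have := h (i + 1) (by simpa using hi) (by simpa using hpop)
      simp only [List.take_succ_cons, List.countP_cons] at this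
      have hle : op.length ≤ 1 := by omega
      simp [hop, hle] at this ⊢
      omega

-- main simulation: A's (heap, length) and B's sorted list stay in lockstep
lemma sim : ∀ (Q : List (List Int)) (ans es data : List Int),
    IsHeap es → List.Perm es data → data.Sorted (· ≤ ·) → Ok Q es.length →
    (Q.foldl stepA (ans, es.length, E es)).1 = (Q.foldl stepB (ans, data)).1 := by
  intro Q
  induction Q with
  | nil => intro ans es data _ _ _ _; rfl
  | cons op rest ih =>
    intro ans es data hh hperm hs hok
    rw [Ok] at hok
    simp only [List.foldl_cons]
    by_cases hop : 1 < op.length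
    · rw [if_pos hop] at hok
      obtain ⟨es', h1, h2, h3⟩ := insertA_spec es (op.getD 1 0) hh
      have hstepA : stepA (ans, es.length, E es) op = (ans, es'.length, E es') := by
        simp only [stepA, if_pos hop, h1]
      have hstepB : stepB (ans, data) op = (ans, insSorted (op.getD 1 0) data) := by
        simp only [stepB, if_pos hop]
      rw [hstepA, hstepB]
      have hlen : es'.length = es.length + 1 := by rw [h2.length_eq]; simp
      exact ih ans es' (insSorted (op.getD 1 0) data) h3
        (h2.trans ((hperm.cons _).trans (insSorted_perm _ data).symm))
        (insSorted_sorted _ data hs) (by rw [hlen]; exact hok)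
    · rw [if_neg hop] at hok
      obtain ⟨hpos, hok'⟩ := hok
      have hne : es ≠ [] := by intro h; rw [h] at hpos; simp at hpos
      obtain ⟨d, t, rfl⟩ : ∃ d t, data = d :: t := by
        cases data with
        | nil => exact absurd (hperm.length_eq ▸ hpos) (by simp)
        | cons a s => exact ⟨a, s, rfl⟩
      obtain ⟨es', h1, h2, h3⟩ := popA_spec es hne hh
      have hroot : g es 0 = d := root_eq_head es d t hh hperm hs
      have hstepA : stepA (ans, es.length, E es) op = (ans ++ [d], es.length - 1, E es') := by
        simp only [stepA, if_neg hop, h1, Option.getD_some, hroot]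
      have hstepB : stepB (ans, d :: t) op = (ans ++ [d], t) := by
        simp only [stepB, if_neg hop]
      rw [hstepA, hstepB]
      have htperm : List.Perm es' t := by
        refine h2.trans ?_
        have : List.Perm es.tail t := by
          cases es with
          | nil => exact absurd rfl hne
          | cons e0 r =>
            have he0 : e0 = d := by simpa [g] using hroot
            subst he0
            exact hperm.cons_inv
        exact this
      have hlen' : es'.length = es.length - 1 := by
        rw [htperm.length_eq, hperm.length_eq]; simp
      rw [← hlen']
      exact ih (ans ++ [d]) es' t h3 htperm (List.sorted_cons.mp hs).2 (by rw [hlen']; exact hok')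

-- ===== VERDICT (by name: the statement is the Claim_ definition above) =====
theorem minHeap_spec : Claim_equal_minHeap := by
  intro N Q _ hpre
  unfold Spec_minHeap minHeap minHeap_alt
  have h0 : ([none] : List (Option Int)) = E [] := rfl
  rw [h0]
  have : (0 : Nat) = ([] : List Int).length := rfl
  rw [this]
  refine sim Q [] [] [] ?_ (List.Perm.refl _) List.Pairwise.nil ?_
  · intro j hj0 hjlen; simp at hjlen
  · exact ok_of_counts Q 0 (by simpa using hpre)
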